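-- pv_equiv track=rewrite | github.com/Radcliffe/OEIS-Python | src/oeispy/A352/A352653.py | A352653
-- ===== SOURCE A (Python) =====
-- def A352653(n):
--     if n == 0: return 0
--     m, g = 1, 0
--     for k in range(n+1):
--         g += m*n**2//(n+k)**2
--         m *= ((n+k+1)*(n-k))**2
--         m //= (k+1)**4
--     return g>>1 # _Chai Wah Wu_, Oct 03 2022
-- ===== SOURCE B (Python) =====
-- def A352653(n):
--     if n <= 0:
--         return 0
--     # binary splitting over the term ratios r(j) = ((n+j)*(n-j))**2 / (j+1)**4:
--     # rec(a, b) returns (P, Q, T) with P = prod of numerators, Q = prod of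
--     # denominators over j in [a, b), and T/Q = sum over k in [a, b) of
--     # prod_{a<=j<k} r(j); then sum of all terms = T // Q (exact).
--     def rec(a, b):
--         if b - a == 1:
--             p = ((n + a) * (n - a)) ** 2
--             q = (a + 1) ** 4
--             return (p, q, q)
--         m = (a + b) // 2
--         pl, ql, tl = rec(a, m)
--         pr, qr, tr = rec(m, b)
--         return (pl * pr, ql * qr, tl * qr + pl * tr)
--     p, q, t = rec(0, n + 1)
--     return (t // q) >> 1
-- ===== Notes on version B (the rewrite author's own statement) =====
-- stated objective: alternative
-- what changed: Replaces A's linear left-to-right scan, which threads a multiplicative accumulator through exact floor divisions at every step, by binary splitting: a divide-and-conquer tree that combines (numerator-product, denominator-product, weighted partial sum) triples of the hypergeometric term ratios ((n+j)(n-j))^2/(j+1)^4 and performs a single exact division t//q at the end.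
import Mathlib
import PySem

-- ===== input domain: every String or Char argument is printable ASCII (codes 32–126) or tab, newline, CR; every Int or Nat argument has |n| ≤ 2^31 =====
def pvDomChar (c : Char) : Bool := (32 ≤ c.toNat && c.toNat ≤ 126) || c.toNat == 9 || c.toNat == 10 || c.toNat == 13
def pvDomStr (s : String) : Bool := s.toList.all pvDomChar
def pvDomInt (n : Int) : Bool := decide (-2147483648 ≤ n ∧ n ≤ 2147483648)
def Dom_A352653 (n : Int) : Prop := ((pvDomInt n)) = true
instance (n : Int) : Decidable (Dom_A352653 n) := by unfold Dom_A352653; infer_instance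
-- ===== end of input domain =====

-- B replaces A's linear scan with its multiplicative accumulator by binary splitting: a
-- divide-and-conquer product/sum tree over the term ratios ((n+j)(n-j))^2/(j+1)^4 with a single
-- exact division at the end. Objective: a genuinely different (divide-and-conquer) algorithm.

-- ===== PORT A =====
def A352653 (n : Int) : Int :=
  if n = 0 then 0
  else
    let r := (PySem.List.pyRange 0 (n + 1) 1).foldl
      (fun (mg : Int × Int) k =>
        (PySem.Int.floordiv (mg.1 * ((n + k + 1) * (n - k)) ^ 2) ((k + 1) ^ 4),
         mg.2 + PySem.Int.floordiv (mg.1 * n ^ 2) ((n + k) ^ 2)))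
      (1, 0)
    r.2 >>> 1

-- ===== PORT B =====
-- binary splitting over the term ratios r(j) = ((n+j)(n-j))^2/(j+1)^4;
-- the '≤ 1' base-case test (Python tests '== 1') only makes the recursion total:
-- from (0, n+1) with n ≥ 1 every reached call has b - a ≥ 1, base iff b - a = 1
def pvRec (n a b : Int) : Int × Int × Int :=
  if b - a ≤ 1 then
    (((n + a) * (n - a)) ^ 2, (a + 1) ^ 4, (a + 1) ^ 4)
  else
    let m := PySem.Int.floordiv (a + b) 2
    let l := pvRec n a m
    let r := pvRec n m b
    (l.1 * r.1, l.2.1 * r.2.1, l.2.2 * r.2.1 + l.1 * r.2.2)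
  termination_by (b - a).toNat
  decreasing_by
    · have hm : PySem.Int.floordiv (a + b) 2 = (a + b) / 2 :=
        PySem.Int.floordiv_eq_ediv_of_pos (by omega)
      omega
    · have hm : PySem.Int.floordiv (a + b) 2 = (a + b) / 2 :=
        PySem.Int.floordiv_eq_ediv_of_pos (by omega)
      omega

def A352653_alt (n : Int) : Int :=
  if n ≤ 0 then 0
  else
    let r := pvRec n 0 (n + 1)
    (PySem.Int.floordiv r.2.2 r.2.1) >>> 1

-- ===== PRECONDITION & SPEC =====
def Spec_A352653 (n : Int) (out : Int) : Prop := out = A352653_alt n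
instance (n : Int) (out : Int) : Decidable (Spec_A352653 n out) := by unfold Spec_A352653; infer_instance

-- ===== CLAIM (what is proved, stated in full; the proofs are below) =====
def Claim_equal_A352653 : Prop := ∀ (n : Int), Dom_A352653 n → Spec_A352653 n (A352653 n)

-- ===== LEMMAS AND PROOFS =====

-- value of A's accumulator m at the start of iteration k (for n = P+1), and the summand added at k
def pvMval (P k : Nat) : Int := (((P + 1 + k).choose k * (P + 1).choose k : Nat) : Int) ^ 2
def pvTerm (P k : Nat) : Int := (((P + k).choose k * (P + 1).choose k : Nat) : Int) ^ 2

lemma pv_key1 (P k : Nat) : (P + 1 + k).choose k * (P + 1) = (P + k).choose k * (P + k + 1) := by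
  have h1 := Nat.add_one_mul_choose_eq (P + k) P
  have h2 : (P + k).choose P = (P + k).choose k := by
    have := Nat.choose_symm (n := P + k) (k := k) (by omega)
    simpa [show P + k - k = P from by omega] using this
  have h3 : (P + k + 1).choose (P + 1) = (P + k + 1).choose k := by
    have := Nat.choose_symm (n := P + k + 1) (k := k) (by omega)
    simpa [show P + k + 1 - k = P + 1 from by omega] using this
  have h4 : (P + k + 1) * (P + k).choose k = (P + k + 1).choose k * (P + 1) := by
    rw [← h2, ← h3]; exact h1
  rw [show P + 1 + k = P + k + 1 from by omega, ← h4, Nat.mul_comm]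

lemma pv_key2 (N k : Nat) : (N + k).choose k * (N + k + 1) = (N + k + 1).choose (k + 1) * (k + 1) := by
  rw [Nat.mul_comm]
  exact Nat.add_one_mul_choose_eq (N + k) k

-- one iteration of A's loop maps the invariant state at k to the invariant state at k+1
lemma pv_stepA (P k : Nat) (hk : k ≤ P + 1) (g : Int) :
    (PySem.Int.floordiv (pvMval P k * ((((P : Int) + 1) + (k : Int) + 1) * (((P : Int) + 1) - (k : Int))) ^ 2) (((k : Int) + 1) ^ 4),
     g + PySem.Int.floordiv (pvMval P k * ((P : Int) + 1) ^ 2) ((((P : Int) + 1) + (k : Int)) ^ 2))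
    = (pvMval P (k + 1), g + pvTerm P k) := by
  simp only [Prod.mk.injEq]
  refine ⟨?_, ?_⟩
  · have hsub : (P : Int) + 1 - (k : Int) = ((P + 1 - k : Nat) : Int) := by
      rw [Nat.cast_sub hk]; push_cast; ring
    have h1 : (P : Int) + 1 + (k : Int) + 1 = ((P + k + 2 : Nat) : Int) := by push_cast; ring
    have h2 : ((k : Int) + 1) ^ 4 = (((k + 1) ^ 4 : Nat) : Int) := by push_cast; ring
    rw [hsub, h1, h2]
    unfold pvMval
    rw [show ((((P + 1 + k).choose k * (P + 1).choose k : Nat) : Int)) ^ 2 *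
          (((P + k + 2 : Nat) : Int) * ((P + 1 - k : Nat) : Int)) ^ 2
        = (((((P + 1 + k).choose k * (P + 1).choose k) ^ 2 * ((P + k + 2) * (P + 1 - k)) ^ 2 : Nat)) : Int)
      from by push_cast; ring]
    rw [PySem.Int.floordiv_natCast]
    have a1 : (P + 1 + k).choose k * (P + k + 2) = (P + k + 2).choose (k + 1) * (k + 1) := by
      have := pv_key2 (P + 1) k
      rw [show P + 1 + k + 1 = P + k + 2 from by omega] at this
      exact this
    have a2 : (P + 1).choose k * (P + 1 - k) = (P + 1).choose (k + 1) * (k + 1) :=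
      (Nat.choose_succ_right_eq (P + 1) k).symm
    have key : ((P + 1 + k).choose k * (P + 1).choose k) ^ 2 * ((P + k + 2) * (P + 1 - k)) ^ 2
        = ((P + 1 + (k + 1)).choose (k + 1) * (P + 1).choose (k + 1)) ^ 2 * (k + 1) ^ 4 := by
      calc ((P + 1 + k).choose k * (P + 1).choose k) ^ 2 * ((P + k + 2) * (P + 1 - k)) ^ 2
          = ((P + 1 + k).choose k * (P + k + 2) * ((P + 1).choose k * (P + 1 - k))) ^ 2 := by ring
        _ = ((P + k + 2).choose (k + 1) * (k + 1) * ((P + 1).choose (k + 1) * (k + 1))) ^ 2 := by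
            rw [a1, a2]
        _ = ((P + 1 + (k + 1)).choose (k + 1) * (P + 1).choose (k + 1)) ^ 2 * (k + 1) ^ 4 := by
            rw [show P + 1 + (k + 1) = P + k + 2 from by omega]; ring
    rw [key, Nat.mul_div_cancel _ (by positivity)]
    push_cast
    ring
  · congr 1
    have e2 : (((P : Int) + 1) + (k : Int)) ^ 2 = (((P + k + 1) ^ 2 : Nat) : Int) := by
      push_cast; ring
    have e1 : pvMval P k * ((P : Int) + 1) ^ 2
        = (((((P + k).choose k * (P + 1).choose k) ^ 2 * (P + k + 1) ^ 2 : Nat)) : Int) := by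
      unfold pvMval
      have : ((P + 1 + k).choose k * (P + 1).choose k) * (P + 1)
          = ((P + k).choose k * (P + 1).choose k) * (P + k + 1) := by
        rw [show (P + 1 + k).choose k * (P + 1).choose k * (P + 1)
              = (P + 1 + k).choose k * (P + 1) * (P + 1).choose k from by ring, pv_key1]
        ring
      have hsq : (((P + 1 + k).choose k * (P + 1).choose k) * (P + 1)) ^ 2
          = ((P + k).choose k * (P + 1).choose k) ^ 2 * (P + k + 1) ^ 2 := by
        rw [this]; ring
      push_cast [← hsq]
      ring
    rw [e1, e2, PySem.Int.floordiv_natCast, Nat.mul_div_cancel _ (by positivity)]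
    unfold pvTerm
    push_cast
    ring

-- A's loop over the indices j, j+1, …, j+c-1 from the invariant state
lemma pv_loopA (P : Nat) : ∀ (c j : Nat), j + c ≤ P + 2 → ∀ g0 : Int,
    (List.range' j c).foldl
      (fun (mg : Int × Int) (k : Nat) =>
        (PySem.Int.floordiv (mg.1 * ((((P : Int) + 1) + (k : Int) + 1) * (((P : Int) + 1) - (k : Int))) ^ 2) (((k : Int) + 1) ^ 4),
         mg.2 + PySem.Int.floordiv (mg.1 * ((P : Int) + 1) ^ 2) ((((P : Int) + 1) + (k : Int)) ^ 2)))
      (pvMval P j, g0)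
    = (pvMval P (j + c), g0 + ((List.range' j c).map (fun k => pvTerm P k)).sum) := by
  intro c
  induction c with
  | zero => intro j _ g0; simp
  | succ c ih =>
    intro j hj g0
    rw [List.range'_succ, List.foldl_cons, List.map_cons, List.sum_cons]
    rw [pv_stepA P j (by omega) g0]
    rw [ih (j + 1) (by omega) (g0 + pvTerm P j)]
    refine Prod.ext ?_ ?_
    · simp only; congr 1; omega
    · simp only; ring

-- B-side: partial products of the numerators/denominators of the ratios, and the
-- binary-splitting numerator pvT: pvT/pvQ is the partial sum of the terms
def pvP (P a b : Nat) : Int :=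
  ((List.range' a (b - a)).map (fun (j : Nat) => (((P : Int) + 1 + (j : Int)) * ((P : Int) + 1 - (j : Int))) ^ 2)).prod
def pvQ (a b : Nat) : Int :=
  ((List.range' a (b - a)).map (fun (j : Nat) => ((j : Int) + 1) ^ 4)).prod
def pvT (P a b : Nat) : Int :=
  ((List.range' a (b - a)).map (fun (k : Nat) => pvP P a k * pvQ k b)).sum

lemma pv_range_split (a b c : Nat) (hab : a ≤ b) (hbc : b ≤ c) :
    List.range' a (c - a) = List.range' a (b - a) ++ List.range' b (c - b) := by
  have h := (List.range'_append (s := a) (m := b - a) (n := c - b) (step := 1))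
  simp only [Nat.one_mul] at h
  rw [show a + (b - a) = b from by omega] at h
  rw [show (b - a) + (c - b) = c - a from by omega] at h
  exact h.symm

lemma pvP_mul (P a b c : Nat) (hab : a ≤ b) (hbc : b ≤ c) :
    pvP P a b * pvP P b c = pvP P a c := by
  unfold pvP
  rw [pv_range_split a b c hab hbc, List.map_append, List.prod_append]

lemma pvQ_mul (a b c : Nat) (hab : a ≤ b) (hbc : b ≤ c) :
    pvQ a b * pvQ b c = pvQ a c := by
  unfold pvQ
  rw [pv_range_split a b c hab hbc, List.map_append, List.prod_append]

lemma pvQ_pos (a b : Nat) : 0 < pvQ a b := by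
  unfold pvQ
  refine List.prod_pos ?_
  intro x hx
  obtain ⟨j, _, rfl⟩ := List.mem_map.mp hx
  positivity

lemma pvT_merge (P a b c : Nat) (hab : a ≤ b) (hbc : b ≤ c) :
    pvT P a c = pvT P a b * pvQ b c + pvP P a b * pvT P b c := by
  unfold pvT
  rw [pv_range_split a b c hab hbc, List.map_append, List.sum_append]
  congr 1
  · rw [show (List.range' a (b - a)).map (fun k => pvP P a k * pvQ k c)
        = (List.range' a (b - a)).map (fun k => (pvP P a k * pvQ k b) * pvQ b c) from
      List.map_congr_left (by
        intro k hk
        have hkb : k < b := by have := List.mem_range'_1.mp hk; omega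
        rw [mul_assoc, pvQ_mul k b c (by omega) hbc])]
    rw [← List.sum_map_mul_right]
  · rw [show (List.range' b (c - b)).map (fun k => pvP P a k * pvQ k c)
        = (List.range' b (c - b)).map (fun k => pvP P a b * (pvP P b k * pvQ k c)) from
      List.map_congr_left (by
        intro k hk
        have hkb : b ≤ k := by have := List.mem_range'_1.mp hk; omega
        rw [← mul_assoc, pvP_mul P a b k hab hkb])]
    rw [← List.sum_map_mul_left]

-- pvRec computes exactly (pvP, pvQ, pvT) on every interval it is called on
lemma pvRec_spec (P : Nat) : ∀ (L a b : Nat), b - a ≤ L → a < b →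
    pvRec ((P : Int) + 1) ((a : Nat) : Int) ((b : Nat) : Int) = (pvP P a b, pvQ a b, pvT P a b) := by
  intro L
  induction L with
  | zero => intro a b h hab; omega
  | succ L ih =>
    intro a b hL hab
    rw [pvRec]
    by_cases h1 : ((b : Nat) : Int) - ((a : Nat) : Int) ≤ 1
    · have hb : b = a + 1 := by omega
      subst hb
      rw [if_pos h1]
      have hr1 : a + 1 - a = 1 := by omega
      unfold pvT
      simp [pvP, pvQ, hr1, List.range'_one]
    · rw [if_neg h1]
      have hba : a + 2 ≤ b := by omega
      have hcast : ((a : Nat) : Int) + ((b : Nat) : Int) = (((a + b : Nat)) : Int) := by push_cast; ring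
      have hm : PySem.Int.floordiv (((a : Nat) : Int) + ((b : Nat) : Int)) 2
          = (((a + b) / 2 : Nat) : Int) := by
        rw [hcast]
        exact_mod_cast PySem.Int.floordiv_natCast (a + b) 2
      have hma : a < (a + b) / 2 := by omega
      have hmb : (a + b) / 2 < b := by omega
      simp only [hm]
      rw [ih a ((a + b) / 2) (by omega) hma, ih ((a + b) / 2) b (by omega) hmb]
      simp only
      rw [pvP_mul P a ((a + b) / 2) b (by omega) (by omega),
        pvQ_mul a ((a + b) / 2) b (by omega) (by omega),
        ← pvT_merge P a ((a + b) / 2) b (by omega) (by omega)]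

-- one ratio step: term(k) * num(k) = term(k+1) * den(k)
lemma pv_step_term (P k : Nat) (hk : k ≤ P) :
    pvTerm P k * (((P : Int) + 1 + (k : Int)) * ((P : Int) + 1 - (k : Int))) ^ 2
      = pvTerm P (k + 1) * ((k : Int) + 1) ^ 4 := by
  unfold pvTerm
  have h1 : (P : Int) + 1 + (k : Int) = ((P + k + 1 : Nat) : Int) := by push_cast; ring
  have h2 : (P : Int) + 1 - (k : Int) = ((P + 1 - k : Nat) : Int) := by
    rw [Nat.cast_sub (by omega)]; push_cast; ring
  rw [h1, h2]
  have key : ((P + k).choose k * (P + 1).choose k) ^ 2 * ((P + k + 1) * (P + 1 - k)) ^ 2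
      = ((P + (k + 1)).choose (k + 1) * (P + 1).choose (k + 1)) ^ 2 * (k + 1) ^ 4 := by
    have a1 : (P + k).choose k * (P + k + 1) = (P + k + 1).choose (k + 1) * (k + 1) := pv_key2 P k
    have a2 : (P + 1).choose k * (P + 1 - k) = (P + 1).choose (k + 1) * (k + 1) :=
      (Nat.choose_succ_right_eq (P + 1) k).symm
    calc ((P + k).choose k * (P + 1).choose k) ^ 2 * ((P + k + 1) * (P + 1 - k)) ^ 2
        = ((P + k).choose k * (P + k + 1) * ((P + 1).choose k * (P + 1 - k))) ^ 2 := by ring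
      _ = ((P + k + 1).choose (k + 1) * (k + 1) * ((P + 1).choose (k + 1) * (k + 1))) ^ 2 := by
          rw [a1, a2]
      _ = ((P + (k + 1)).choose (k + 1) * (P + 1).choose (k + 1)) ^ 2 * (k + 1) ^ 4 := by
          rw [show P + (k + 1) = P + k + 1 from by omega]; ring
  calc (((P + k).choose k * (P + 1).choose k : Nat) : Int) ^ 2
        * (((P + k + 1 : Nat) : Int) * ((P + 1 - k : Nat) : Int)) ^ 2
      = ((((P + k).choose k * (P + 1).choose k) ^ 2 * ((P + k + 1) * (P + 1 - k)) ^ 2 : Nat) : Int) := by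
        push_cast; ring
    _ = ((((P + (k + 1)).choose (k + 1) * (P + 1).choose (k + 1)) ^ 2 * (k + 1) ^ 4 : Nat) : Int) := by
        rw [key]
    _ = (((P + (k + 1)).choose (k + 1) * (P + 1).choose (k + 1) : Nat) : Int) ^ 2 * ((k : Int) + 1) ^ 4 := by
        push_cast; ring

-- the numerator product is the term times the denominator product
lemma pvP_eq (P : Nat) : ∀ k, k ≤ P + 1 → pvP P 0 k = pvTerm P k * pvQ 0 k := by
  intro k
  induction k with
  | zero =>
    intro _
    unfold pvP pvQ pvTerm
    simp
  | succ k ih =>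
    intro hk
    have hP : pvP P 0 (k + 1) = pvP P 0 k
        * (((P : Int) + 1 + (k : Int)) * ((P : Int) + 1 - (k : Int))) ^ 2 := by
      unfold pvP
      rw [show k + 1 - 0 = k + 1 from by omega, show k - 0 = k from by omega,
        List.range'_concat, List.map_append, List.prod_append]
      simp
    have hQ : pvQ 0 (k + 1) = pvQ 0 k * ((k : Int) + 1) ^ 4 := by
      unfold pvQ
      rw [show k + 1 - 0 = k + 1 from by omega, show k - 0 = k from by omega,
        List.range'_concat, List.map_append, List.prod_append]
      simp
    rw [hP, ih (by omega), hQ, mul_assoc, mul_comm (pvQ 0 k), ← mul_assoc,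
      pv_step_term P k (by omega)]
    ring

-- the binary-splitting numerator over the whole range is pvQ times the sum of the terms
lemma pvT_eq (P : Nat) :
    pvT P 0 (P + 2) = ((List.range' 0 (P + 2)).map (fun k => pvTerm P k)).sum * pvQ 0 (P + 2) := by
  unfold pvT
  rw [show (List.range' 0 (P + 2 - 0)).map (fun k => pvP P 0 k * pvQ k (P + 2))
      = (List.range' 0 (P + 2 - 0)).map (fun k => pvTerm P k * pvQ 0 (P + 2)) from
    List.map_congr_left (by
      intro k hk
      have hkb : k < P + 2 := by have := List.mem_range'_1.mp hk; omega
      rw [pvP_eq P k (by omega), mul_assoc, pvQ_mul 0 k (P + 2) (by omega) (by omega)])]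
  rw [show P + 2 - 0 = P + 2 from by omega, ← List.sum_map_mul_right]

-- ===== VERDICT (by name: the statement is the Claim_ definition above) =====
theorem A352653_spec : Claim_equal_A352653 := by
  intro n _
  unfold Spec_A352653
  rcases lt_trichotomy n 0 with hneg | hz | hpos
  · have hnilA : PySem.List.pyRange 0 (n + 1) 1 = [] :=
      PySem.List.pyRange_one_eq_nil (by omega)
    simp only [A352653, A352653_alt, hnilA, List.foldl_nil,
      if_neg (show n ≠ 0 from by omega), if_pos (show n ≤ 0 from by omega)]
    decide
  · subst hz; rfl
  · obtain ⟨P, rfl⟩ : ∃ P : Nat, n = (P : Int) + 1 := ⟨(n - 1).toNat, by omega⟩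
    have hne : ((P : Int) + 1) ≠ 0 := by positivity
    have hrA : PySem.List.pyRange 0 (((P : Int) + 1) + 1) 1
        = (List.range' 0 (P + 2)).map (fun (k : Nat) => (k : Int)) := by
      rw [show ((P : Int) + 1) + 1 = ((P + 2 : Nat) : Int) from by push_cast; ring,
        PySem.List.pyRange_zero_nat, List.range_eq_range']
    simp only [A352653, A352653_alt, if_neg hne, if_neg (show ¬ ((P : Int) + 1) ≤ 0 from by omega),
      hrA, List.foldl_map]
    have hA := pv_loopA P (P + 2) 0 (by omega) 0
    have hm0 : pvMval P 0 = 1 := by unfold pvMval; simp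
    rw [hm0] at hA
    simp only [Nat.zero_add] at hA
    have hB := pvRec_spec P (P + 2) 0 (P + 2) (by omega) (by omega)
    rw [show ((0 : Nat) : Int) = (0 : Int) from rfl,
      show (((P + 2 : Nat)) : Int) = ((P : Int) + 1) + 1 from by push_cast; ring] at hB
    rw [hA, hB]
    simp only
    rw [zero_add, pvT_eq P,
      PySem.Int.floordiv_eq_ediv_of_pos (pvQ_pos 0 (P + 2)),
      Int.mul_ediv_cancel _ (ne_of_gt (pvQ_pos 0 (P + 2)))]
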